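-- pv_equiv track=rewrite | github.com/CrisGab22/prueba-lago-musical | lago_musical.py | searchNextSoundsFromSong
-- ===== SOURCE A (Python) =====
-- songs = [
--     ["brr", "fiu", "cric-cric", "brrah"],
--     ["pep", "birip", "trri-trri", "croac"],
--     ["bri-bri", "plop", "cric-cric", "brrah"]
-- ]
--
-- def searchNextSoundsFromSong(sound):
--     for song in songs:
--         if sound in song:
--             index = song.index(sound)
--             if (index + 1) == len(song):
--                 return ""
--             return ", " .join(song[index+ 1:])
--     return ""
-- ===== SOURCE B (Python) =====
-- songs = [
--     ["brr", "fiu", "cric-cric", "brrah"],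
--     ["pep", "birip", "trri-trri", "croac"],
--     ["bri-bri", "plop", "cric-cric", "brrah"]
-- ]
--
-- # Build the answer table once at module load: first occurrence (in song order) wins,
-- # and the suffix-join is "" exactly when the sound is the last element of its song.
-- _nextSounds = {}
-- for _song in songs:
--     for _i, _s in enumerate(_song):
--         _nextSounds.setdefault(_s, ", ".join(_song[_i + 1:]))
--
-- def searchNextSoundsFromSong(sound):
--     return _nextSounds.get(sound, "")
-- ===== Notes on version B (the rewrite author's own statement) =====
-- stated objective: idiomatic
-- what changed: B builds a dict (sound -> joined suffix) once at module load with first-occurrence-wins setdefault, so each call is a single dict lookup instead of A's per-call scan of all songs with index() and slicing.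
import Mathlib
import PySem

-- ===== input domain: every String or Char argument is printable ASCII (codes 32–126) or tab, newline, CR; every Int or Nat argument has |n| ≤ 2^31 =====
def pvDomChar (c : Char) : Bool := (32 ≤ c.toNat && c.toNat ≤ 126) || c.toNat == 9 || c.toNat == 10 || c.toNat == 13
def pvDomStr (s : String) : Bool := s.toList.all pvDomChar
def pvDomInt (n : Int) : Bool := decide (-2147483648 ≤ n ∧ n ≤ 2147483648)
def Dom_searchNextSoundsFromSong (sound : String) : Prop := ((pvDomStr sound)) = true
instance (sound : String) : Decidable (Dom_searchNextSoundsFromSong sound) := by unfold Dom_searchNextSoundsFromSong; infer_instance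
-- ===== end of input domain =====

-- B replaces A's per-call scan over the songs with a table built once at module load
-- (first occurrence wins) and a single dictionary lookup per call.

def songsL : List (List String) :=
  [["brr", "fiu", "cric-cric", "brrah"],
   ["pep", "birip", "trri-trri", "croac"],
   ["bri-bri", "plop", "cric-cric", "brrah"]]

-- ===== PORT A =====
-- the 'for song in songs' loop with early returns
def searchA (sound : String) : List (List String) → String
  | [] => ""
  | song :: rest =>
    if song.contains sound then
      match PySem.List.index? song sound with
      | some index =>
        if ((index : Int) + 1) == PySem.List.len song then ""
        else PySem.Str.join ", " (PySem.List.slice song (some ((index : Int) + 1)) none)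
      | none => ""  -- unreachable: guarded by the membership test
    else searchA sound rest

def searchNextSoundsFromSong (sound : String) : String := searchA sound songsL

-- ===== PORT B =====
-- the table built at module load: for each song, for each position, setdefault
def nextSounds : PySem.Dict String String :=
  songsL.foldl
    (fun d song =>
      (PySem.List.enumerate song).foldl
        (fun d p =>
          d.setdefault p.2 (PySem.Str.join ", " (PySem.List.slice song (some (p.1 + 1)) none)))
        d)
    PySem.Dict.empty

def searchNextSoundsFromSong_alt (sound : String) : String := nextSounds.getD sound ""

-- ===== PRECONDITION & SPEC =====
def Spec_searchNextSoundsFromSong (sound : String) (out : String) : Prop := out = searchNextSoundsFromSong_alt sound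
instance (sound : String) (out : String) : Decidable (Spec_searchNextSoundsFromSong sound out) := by unfold Spec_searchNextSoundsFromSong; infer_instance

-- ===== CLAIM (what is proved, stated in full; the proofs are below) =====
def Claim_equal_searchNextSoundsFromSong : Prop := ∀ (sound : String), Dom_searchNextSoundsFromSong sound → Spec_searchNextSoundsFromSong sound (searchNextSoundsFromSong sound)

-- ===== LEMMAS AND PROOFS =====

theorem nextSounds_eval : nextSounds = PySem.Dict.mk
    [("brr", "fiu, cric-cric, brrah"), ("fiu", "cric-cric, brrah"),
     ("cric-cric", "brrah"), ("brrah", ""),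
     ("pep", "birip, trri-trri, croac"), ("birip", "trri-trri, croac"),
     ("trri-trri", "croac"), ("croac", ""),
     ("bri-bri", "plop, cric-cric, brrah"), ("plop", "cric-cric, brrah")] := by
  decide

-- ===== VERDICT (by name: the statement is the Claim_ definition above) =====
theorem searchNextSoundsFromSong_spec : Claim_equal_searchNextSoundsFromSong := by
  intro sound _
  unfold Spec_searchNextSoundsFromSong searchNextSoundsFromSong searchNextSoundsFromSong_alt
  rw [nextSounds_eval]
  by_cases h1 : sound = "brr"; · subst h1; decide
  by_cases h2 : sound = "fiu"; · subst h2; decide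
  by_cases h3 : sound = "cric-cric"; · subst h3; decide
  by_cases h4 : sound = "brrah"; · subst h4; decide
  by_cases h5 : sound = "pep"; · subst h5; decide
  by_cases h6 : sound = "birip"; · subst h6; decide
  by_cases h7 : sound = "trri-trri"; · subst h7; decide
  by_cases h8 : sound = "croac"; · subst h8; decide
  by_cases h9 : sound = "bri-bri"; · subst h9; decide
  by_cases h10 : sound = "plop"; · subst h10; decide
  simp [searchA, songsL, PySem.Dict.getD, PySem.Dict.get?, PySem.Dict.get?_mk_cons,
    h1, h2, h3, h4, h5, h6, h7, h8, h9, h10,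
    Ne.symm h1, Ne.symm h2, Ne.symm h3, Ne.symm h4, Ne.symm h5,
    Ne.symm h6, Ne.symm h7, Ne.symm h8, Ne.symm h9, Ne.symm h10]
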